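-- pv_equiv track=rewrite | github.com/Syronss/Syronss-Media-Downloader | downloader.py | _get_available_qualities
-- ===== SOURCE A (Python) =====
-- def _get_available_qualities(info: dict) -> list:
--     qualities = set()
--     for f in info.get('formats', []):
--         height = f.get('height')
--         if height:
--             if height >= 2160:
--                 qualities.add('2160')
--             elif height >= 1080:
--                 qualities.add('1080')
--             elif height >= 720:
--                 qualities.add('720')
--             elif height >= 480:
--                 qualities.add('480')
--             elif height >= 360:
--                 qualities.add('360')
--     return sorted(list(qualities), key=int, reverse=True) if qualities else ['best']
-- ===== SOURCE B (Python) =====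
-- _BUCKETS = [(2160, None), (1080, 2160), (720, 1080), (480, 720), (360, 480)]
--
--
-- def _get_available_qualities(info: dict) -> list:
--     heights = [f.get('height') for f in info.get('formats', [])]
--     result = [str(lo) for lo, hi in _BUCKETS
--               if any(h and lo <= h and (hi is None or h < hi) for h in heights)]
--     return result or ['best']
-- ===== Notes on version B (the rewrite author's own statement) =====
-- stated objective: alternative
-- what changed: A folds formats into a set via a five-branch if/elif cascade and then sorts it descending by int; B never builds a set or sorts: it extracts the heights once, then iterates the five (lower,upper) bucket bounds in descending order and emits a bucket's label directly when any height falls in it, producing the output already in order.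
import Mathlib
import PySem

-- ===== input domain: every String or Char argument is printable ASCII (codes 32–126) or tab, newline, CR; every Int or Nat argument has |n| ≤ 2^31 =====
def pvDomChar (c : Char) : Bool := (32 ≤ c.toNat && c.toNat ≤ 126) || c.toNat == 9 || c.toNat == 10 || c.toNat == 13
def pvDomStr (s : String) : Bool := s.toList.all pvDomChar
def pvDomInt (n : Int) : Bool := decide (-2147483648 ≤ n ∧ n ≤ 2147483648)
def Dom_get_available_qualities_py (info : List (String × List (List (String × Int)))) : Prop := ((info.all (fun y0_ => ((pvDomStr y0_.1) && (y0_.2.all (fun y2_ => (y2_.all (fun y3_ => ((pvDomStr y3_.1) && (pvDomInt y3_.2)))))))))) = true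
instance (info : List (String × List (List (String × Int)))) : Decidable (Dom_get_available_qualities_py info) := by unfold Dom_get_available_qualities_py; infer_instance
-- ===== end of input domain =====

-- B avoids A's set-then-sort entirely: it scans the five quality buckets in descending
-- order and emits a label when any format's height lands in that bucket, so the output
-- is built directly in its final order; objective: alternative (no set, no sort).

-- ===== PORT A =====
-- dicts arrive as association lists; .get is first-match lookup, as the type convention fixes.
def get_available_qualities_py (info : List (String × List (List (String × Int)))) : List String :=
  let formats := (List.lookup "formats" info).getD []
  let qualities : PySem.Set String := formats.foldl (fun (q : PySem.Set String) (f : List (String × Int)) =>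
    match List.lookup "height" f with
    | some height =>
      if height ≠ 0 then
        if height ≥ 2160 then PySem.Set.add q "2160"
        else if height ≥ 1080 then PySem.Set.add q "1080"
        else if height ≥ 720 then PySem.Set.add q "720"
        else if height ≥ 480 then PySem.Set.add q "480"
        else if height ≥ 360 then PySem.Set.add q "360"
        else q
      else q
    | none => q) PySem.Set.empty
  -- key=int: the set only ever holds "360".."2160", on which int() succeeds; getD 0 is unreachable
  if qualities ≠ [] then PySem.List.sorted qualities (fun s => (PySem.Int.ofStr? s).getD 0) true
  else ["best"]

-- ===== PORT B =====
-- _BUCKETS: (lower bound, exclusive upper bound) per quality label, descending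
def pvBuckets : List (Int × Option Int) := [(2160, none), (1080, some 2160), (720, some 1080), (480, some 720), (360, some 480)]

def get_available_qualities_py_alt (info : List (String × List (List (String × Int)))) : List String :=
  let heights := ((List.lookup "formats" info).getD []).map (fun f => List.lookup "height" f)
  -- 'h and lo <= h and (hi is None or h < hi)': a missing/None or 0 height is falsy, so the any-test rejects it
  let result := (pvBuckets.filter (fun b => heights.any (fun h? =>
      match h? with
      | some h => decide (h ≠ 0) && decide (b.1 ≤ h) && (match b.2 with | none => true | some hi => decide (h < hi))
      | none => false))).map (fun b => PySem.Int.toStr b.1)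
  if result ≠ [] then result else ["best"]

-- ===== PRECONDITION & SPEC =====
def Spec_get_available_qualities_py (info : List (String × List (List (String × Int)))) (out : List String) : Prop := out = get_available_qualities_py_alt info
instance (info : List (String × List (List (String × Int)))) (out : List String) : Decidable (Spec_get_available_qualities_py info out) := by unfold Spec_get_available_qualities_py; infer_instance

-- ===== CLAIM (what is proved, stated in full; the proofs are below) =====
def Claim_equal_get_available_qualities_py : Prop := ∀ (info : List (String × List (List (String × Int)))), Dom_get_available_qualities_py info → Spec_get_available_qualities_py info (get_available_qualities_py info)

-- ===== LEMMAS AND PROOFS =====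

-- proof-only names for the two ports' inner functions
def pvKey : String → Int := fun s => (PySem.Int.ofStr? s).getD 0

def pvStepA (q : PySem.Set String) (f : List (String × Int)) : PySem.Set String :=
  match List.lookup "height" f with
  | some height =>
    if height ≠ 0 then
      if height ≥ 2160 then PySem.Set.add q "2160"
      else if height ≥ 1080 then PySem.Set.add q "1080"
      else if height ≥ 720 then PySem.Set.add q "720"
      else if height ≥ 480 then PySem.Set.add q "480"
      else if height ≥ 360 then PySem.Set.add q "360"
      else q
    else q
  | none => q

def pvCondB (b : Int × Option Int) (h? : Option Int) : Bool :=
  match h? with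
  | some h => decide (h ≠ 0) && decide (b.1 ≤ h) && (match b.2 with | none => true | some hi => decide (h < hi))
  | none => false

-- what one format contributes to A's set (A's cascade, as a predicate on the label)
def pvContrib (f : List (String × Int)) (x : String) : Prop :=
  match List.lookup "height" f with
  | some h =>
    if h ≠ 0 then
      if h ≥ 2160 then x = "2160"
      else if h ≥ 1080 then x = "1080"
      else if h ≥ 720 then x = "720"
      else if h ≥ 480 then x = "480"
      else if h ≥ 360 then x = "360"
      else False
    else False
  | none => False

theorem pvA_eq (info : List (String × List (List (String × Int)))) :
    get_available_qualities_py info =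
      (if ((List.lookup "formats" info).getD []).foldl pvStepA PySem.Set.empty ≠ [] then
        PySem.List.sorted (((List.lookup "formats" info).getD []).foldl pvStepA PySem.Set.empty) pvKey true
      else ["best"]) := rfl

theorem pvB_eq (info : List (String × List (List (String × Int)))) :
    get_available_qualities_py_alt info =
      (if (pvBuckets.filter (fun b => (((List.lookup "formats" info).getD []).map (fun f => List.lookup "height" f)).any (pvCondB b))).map (fun b => PySem.Int.toStr b.1) ≠ [] then
        (pvBuckets.filter (fun b => (((List.lookup "formats" info).getD []).map (fun f => List.lookup "height" f)).any (pvCondB b))).map (fun b => PySem.Int.toStr b.1)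
      else ["best"]) := rfl

theorem pv_mem_stepA (q : PySem.Set String) (f : List (String × Int)) (x : String) :
    x ∈ pvStepA q f ↔ x ∈ q ∨ pvContrib f x := by
  unfold pvStepA pvContrib
  cases List.lookup "height" f with
  | none => simp
  | some h => dsimp only; split_ifs <;> simp [PySem.Set.mem_add]

theorem pv_nodup_stepA (q : PySem.Set String) (f : List (String × Int)) (hq : q.Nodup) :
    (pvStepA q f).Nodup := by
  unfold pvStepA
  cases List.lookup "height" f with
  | none => exact hq
  | some h => dsimp only; split_ifs <;> first | exact PySem.Set.nodup_add _ _ hq | exact hq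

theorem pv_mem_foldA (fs : List (List (String × Int))) (q : PySem.Set String) (x : String) :
    x ∈ fs.foldl pvStepA q ↔ x ∈ q ∨ ∃ f ∈ fs, pvContrib f x := by
  induction fs generalizing q with
  | nil => simp
  | cons f fs ih =>
    simp only [List.foldl_cons, ih, pv_mem_stepA, List.mem_cons]
    constructor
    · rintro ((h | h) | ⟨g, hg, hc⟩)
      · exact Or.inl h
      · exact Or.inr ⟨f, Or.inl rfl, h⟩
      · exact Or.inr ⟨g, Or.inr hg, hc⟩
    · rintro (h | ⟨g, (rfl | hg), hc⟩)
      · exact Or.inl (Or.inl h)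
      · exact Or.inl (Or.inr hc)
      · exact Or.inr ⟨g, hg, hc⟩

theorem pv_nodup_foldA (fs : List (List (String × Int))) (q : PySem.Set String) (hq : q.Nodup) :
    (fs.foldl pvStepA q).Nodup := by
  induction fs generalizing q with
  | nil => exact hq
  | cons f fs ih => exact ih _ (pv_nodup_stepA _ _ hq)

-- the bridge: A's per-format contributions are exactly B's bucket tests
theorem pv_bridge (fs : List (List (String × Int))) (x : String) :
    (∃ f ∈ fs, pvContrib f x) ↔
      ∃ b ∈ pvBuckets, (fs.map (fun f => List.lookup "height" f)).any (pvCondB b) = true ∧ x = PySem.Int.toStr b.1 := by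
  constructor
  · rintro ⟨f, hf, hc⟩
    unfold pvContrib at hc
    cases hl : List.lookup "height" f with
    | none => rw [hl] at hc; exact absurd hc not_false
    | some h =>
      rw [hl] at hc
      dsimp only at hc
      have hmem : some h ∈ fs.map (fun f => List.lookup "height" f) :=
        List.mem_map.mpr ⟨f, hf, hl⟩
      split_ifs at hc with h0 h1 h2 h3 h4 h5
      · exact ⟨(2160, none), by decide, List.any_eq_true.mpr ⟨some h, hmem, by simp [pvCondB]; omega⟩, by rw [hc]; decide⟩
      · exact ⟨(1080, some 2160), by decide, List.any_eq_true.mpr ⟨some h, hmem, by simp [pvCondB]; omega⟩, by rw [hc]; decide⟩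
      · exact ⟨(720, some 1080), by decide, List.any_eq_true.mpr ⟨some h, hmem, by simp [pvCondB]; omega⟩, by rw [hc]; decide⟩
      · exact ⟨(480, some 720), by decide, List.any_eq_true.mpr ⟨some h, hmem, by simp [pvCondB]; omega⟩, by rw [hc]; decide⟩
      · exact ⟨(360, some 480), by decide, List.any_eq_true.mpr ⟨some h, hmem, by simp [pvCondB]; omega⟩, by rw [hc]; decide⟩
  · rintro ⟨b, hb, hany, rfl⟩
    obtain ⟨h?, hmem, hcond⟩ := List.any_eq_true.mp hany
    cases h? with
    | none => exact absurd hcond (by simp [pvCondB])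
    | some h =>
      obtain ⟨f, hf, hl⟩ := List.mem_map.mp hmem
      refine ⟨f, hf, ?_⟩
      unfold pvContrib
      rw [hl]
      have hb5 : b = (2160, (none : Option Int)) ∨ b = (1080, some 2160) ∨ b = (720, some 1080) ∨
          b = (480, some 720) ∨ b = (360, some 480) := by
        simpa [pvBuckets] using hb
      rcases hb5 with rfl | rfl | rfl | rfl | rfl <;>
        simp [pvCondB] at hcond <;> dsimp only <;> split_ifs <;> first | decide | omega

-- ===== VERDICT (by name: the statement is the Claim_ definition above) =====
theorem get_available_qualities_py_spec : Claim_equal_get_available_qualities_py := by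
  intro info _
  show get_available_qualities_py info = get_available_qualities_py_alt info
  rw [pvA_eq, pvB_eq]
  set fs := (List.lookup "formats" info).getD [] with hfs
  set S := fs.foldl pvStepA PySem.Set.empty with hS
  set ys := (pvBuckets.filter (fun b => (fs.map (fun f => List.lookup "height" f)).any (pvCondB b))).map (fun b => PySem.Int.toStr b.1) with hys
  have hmem : ∀ x, x ∈ ys ↔ x ∈ S := by
    intro x
    rw [hS, pv_mem_foldA]
    simp only [PySem.Set.empty, List.not_mem_nil, false_or]
    rw [pv_bridge]
    constructor
    · intro hx
      obtain ⟨b, hbf, rfl⟩ := List.mem_map.mp hx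
      obtain ⟨hb, hany⟩ := List.mem_filter.mp hbf
      exact ⟨b, hb, hany, rfl⟩
    · rintro ⟨b, hb, hany, rfl⟩
      exact List.mem_map.mpr ⟨b, List.mem_filter.mpr ⟨hb, hany⟩, rfl⟩
  have hnodupS : S.Nodup := pv_nodup_foldA _ _ List.nodup_nil
  have hsub : ys.Sublist (pvBuckets.map (fun b => PySem.Int.toStr b.1)) :=
    List.Sublist.map (fun b : Int × Option Int => PySem.Int.toStr b.1) List.filter_sublist
  have hnodupYs : ys.Nodup := hsub.nodup (by decide)
  have hpair : ys.Pairwise (fun a b => pvKey b < pvKey a) :=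
    List.Pairwise.sublist hsub (by decide)
  have hperm : ys.Perm S := (List.perm_ext_iff_of_nodup hnodupYs hnodupS).mpr hmem
  have hsorted : PySem.List.sorted S pvKey true = ys :=
    PySem.List.sorted_rev_eq_of_perm_of_pairwise_gt _ _ _ hperm hpair
  by_cases hSe : S = []
  · have hye : ys = [] := by
      rw [List.eq_nil_iff_forall_not_mem] at hSe ⊢
      intro x hx; exact hSe x ((hmem x).mp hx)
    simp [hSe, hye]
  · have hye : ys ≠ [] := fun h => hSe (List.Perm.eq_nil (hperm.symm.trans (h ▸ List.Perm.refl _)))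
    simp [hSe, hye, hsorted]
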